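-- pv_equiv track=rewrite | github.com/1629lyk/CS-218-Spring-2025 | HW2-Challenge/B-Secret-Message/codef.py | smallest_message
-- ===== SOURCE A (Python) =====
-- def smallest_message(grid):
--
--     n = len(grid)
--     m = len(grid[0])
--     best = ['{' * (n * m + 1)]  # It is Lexicographically greater than any valid string
--
--     dir = [(0, 1), (1, 0), (-1, 0), (0, -1)]  # RDUL -> direction
--
--     vis = [[False] * m for _ in range(n)]
--     vis[0][0] = True
--
--
--     dfs(0, 0, grid[0][0], grid, n, m, vis, best, dir)
--     return best[0]
--
-- def dfs(x, y, prefix, grid, n, m, vis, best, dir):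
--
--     if len(prefix) >= len(best[0]) and prefix == best[0][:len(prefix)]:
--         return
--
--     # Remove it if current path is not found to be better than the other choice so far
--     if prefix > best[0][:len(prefix)]:
--         return
--
--
--     if x == n - 1 and y == m - 1:
--         if prefix < best[0]:
--             best[0] = prefix
--         return
--
--     neig = []
--     for dx, dy in dir:
--
--         nx, ny = x + dx, y + dy
--
--
--         if 0 <= nx < n and 0 <= ny < m and not vis[nx][ny]:
--             neig.append((grid[nx][ny], nx, ny))
--
--     neig.sort()  # It is Lexicographically smallest options first
--
--     for ch, nx, ny in neig:
--         vis[nx][ny] = True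
--         dfs(nx, ny, prefix + ch, grid, n, m, vis, best, dir)
--         vis[nx][ny] = False
-- ===== SOURCE B (Python) =====
-- def smallest_message(grid):
--     n = len(grid)
--     m = len(grid[0])
--     best = '{' * (n * m + 1)  # lexicographically above any candidate path
--     stack = [(0, 0, grid[0][0], frozenset([(0, 0)]))]
--     while stack:
--         x, y, prefix, visited = stack.pop()
--         k = len(prefix)
--         if k >= len(best) and prefix == best[:k]:
--             continue
--         if prefix > best[:k]:
--             continue
--         if x == n - 1 and y == m - 1:
--             if prefix < best:
--                 best = prefix
--             continue
--         children = []
--         for dx, dy in ((0, 1), (1, 0), (-1, 0), (0, -1)):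
--             nx, ny = x + dx, y + dy
--             if 0 <= nx < n and 0 <= ny < m and (nx, ny) not in visited:
--                 children.append((grid[nx][ny], nx, ny))
--         children.sort()
--         for ch, nx, ny in reversed(children):
--             stack.append((nx, ny, prefix + ch, visited | {(nx, ny)}))
--     return best
-- ===== Notes on version B (the rewrite author's own statement) =====
-- stated objective: alternative
-- what changed: A's recursive DFS with a shared mutable boolean visited grid and best stored in a one-element list is replaced by an iterative DFS over an explicit stack of (x, y, prefix, frozenset-of-visited-coordinates) states with best as a plain accumulator, applying the same prunings at pop time.
-- outside the precondition, e.g. on smallest_message([]): A raises IndexError, B raises IndexError; on smallest_message([['a', 'b'], ['c']]): A raises IndexError, B raises IndexError; on smallest_message([['|', '|z'], [], []]): A returns '{{{{{{{', B returns '{{{{{{{'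
import Mathlib
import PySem

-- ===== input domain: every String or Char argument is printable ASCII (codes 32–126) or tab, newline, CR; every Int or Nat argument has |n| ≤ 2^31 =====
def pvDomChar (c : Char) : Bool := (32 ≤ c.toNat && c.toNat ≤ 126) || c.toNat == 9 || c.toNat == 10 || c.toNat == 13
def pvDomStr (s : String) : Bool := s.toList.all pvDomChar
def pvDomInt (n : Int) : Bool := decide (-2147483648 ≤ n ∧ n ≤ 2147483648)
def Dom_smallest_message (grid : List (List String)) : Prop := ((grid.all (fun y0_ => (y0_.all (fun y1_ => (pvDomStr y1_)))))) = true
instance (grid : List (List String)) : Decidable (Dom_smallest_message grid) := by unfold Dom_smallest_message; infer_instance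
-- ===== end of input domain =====

-- B replaces A's recursive DFS (shared mutable boolean visited grid, best kept in a one-cell list)
-- by an iterative DFS over an explicit stack of (x, y, prefix, visited-coordinate-set) states with
-- best as a plain accumulator — an alternative decomposition of the same pruned search, not faster.
-- Strings are modelled as List Char internally (PySem convention); list slices best[:k] with k ≥ 0
-- are ported as List.take (exact for nonnegative bounds).

-- ===== PORT A =====

def pvDirs : List (Int × Int) := [(0, 1), (1, 0), (-1, 0), (0, -1)]

def pvCell (grid : List (List String)) (i j : Int) : List Char :=
  (PySem.List.pyGetD (PySem.List.pyGetD grid i []) j "").toList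

def pvSortKey (t : List Char × Int × Int) : Lex (List Char × Lex (Int × Int)) :=
  toLex (t.1, toLex (t.2.1, t.2.2))

def pvVisGet (vis : List (List Bool)) (i j : Int) : Bool :=
  (vis.getD i.toNat []).getD j.toNat false

def pvVisSet (vis : List (List Bool)) (i j : Int) : List (List Bool) :=
  vis.set i.toNat ((vis.getD i.toNat []).set j.toNat true)

def pvCountFalse (vis : List (List Bool)) : Nat :=
  (vis.map (fun row => row.count false)).sum

def pvNeigA (grid : List (List String)) (n m : Int) (vis : List (List Bool)) (x y : Int) :
    List (List Char × Int × Int) :=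
  pvDirs.foldl (fun acc d =>
    let nx := x + d.1
    let ny := y + d.2
    if 0 ≤ nx ∧ nx < n ∧ 0 ≤ ny ∧ ny < m ∧ pvVisGet vis nx ny = false then
      acc ++ [(pvCell grid nx ny, nx, ny)]
    else acc) []

-- termination helpers
lemma pvCount_set_true (row : List Bool) (j : Nat) (hj : j < row.length)
    (hf : row.getD j false = false) : (row.set j true).count false < row.count false := by
  induction row generalizing j with
  | nil => simp at hj
  | cons b t ih =>
    cases j with
    | zero =>
      simp at hf; subst hf
      simp
    | succ j =>
      simp at hj hf
      have := ih j hj hf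
      simp [List.count_cons]
      omega

lemma pvCountFalse_set_lt (vis : List (List Bool)) (i : Nat) (newrow : List Bool)
    (hi : i < vis.length) (hrow : newrow.count false < (vis.getD i []).count false) :
    pvCountFalse (vis.set i newrow) < pvCountFalse vis := by
  induction vis generalizing i with
  | nil => simp at hi
  | cons r t ih =>
    cases i with
    | zero => simp [pvCountFalse] at hrow ⊢; omega
    | succ i =>
      simp at hi hrow
      have := ih i hi hrow
      simp [pvCountFalse] at this ⊢
      omega

lemma pvVisSet_decr (vis : List (List Bool)) (nx ny : Int)
    (h : nx.toNat < vis.length ∧ ny.toNat < (vis.getD nx.toNat []).length ∧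
         (vis.getD nx.toNat []).getD ny.toNat false = false) :
    pvCountFalse (pvVisSet vis nx ny) < pvCountFalse vis := by
  exact pvCountFalse_set_lt _ _ _ h.1 (pvCount_set_true _ _ h.2.1 h.2.2)

mutual
def pvDfsA (grid : List (List String)) (n m : Int) (vis : List (List Bool))
    (x y : Int) (pfx best : List Char) : List Char :=
  if best.length ≤ pfx.length ∧ pfx = best.take pfx.length then best
  else if best.take pfx.length < pfx then best
  else if x = n - 1 ∧ y = m - 1 then (if pfx < best then pfx else best)
  else pvGoA grid n m vis (PySem.List.sorted (pvNeigA grid n m vis x y) pvSortKey) pfx best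
termination_by (pvCountFalse vis, 1, 0)
decreasing_by
  · exact Prod.Lex.right _ (Prod.Lex.left _ _ (by omega))

def pvGoA (grid : List (List String)) (n m : Int) (vis : List (List Bool))
    (cs : List (List Char × Int × Int)) (pfx best : List Char) : List Char :=
  match cs with
  | [] => best
  | (ch, nx, ny) :: rest =>
    let best' :=
      if h : nx.toNat < vis.length ∧ ny.toNat < (vis.getD nx.toNat []).length ∧
             (vis.getD nx.toNat []).getD ny.toNat false = false then
        pvDfsA grid n m (pvVisSet vis nx ny) nx ny (pfx ++ ch) best
      else best
    pvGoA grid n m vis rest pfx best'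
termination_by (pvCountFalse vis, 0, cs.length)
decreasing_by
  · exact Prod.Lex.left _ _ (pvVisSet_decr vis nx ny h)
  · exact Prod.Lex.right _ (Prod.Lex.right _ (by simp))
end

def smallest_message (grid : List (List String)) : String :=
  let n : Int := grid.length
  let m : Int := (PySem.List.pyGetD grid 0 []).length
  let best0 : List Char := List.replicate (n * m + 1).toNat '{'
  let vis0 : List (List Bool) := List.replicate n.toNat (List.replicate m.toNat false)
  let vis1 := pvVisSet vis0 0 0
  String.ofList (pvDfsA grid n m vis1 0 0 (pvCell grid 0 0) best0)

-- ===== PORT B =====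

-- ===== PORT B =====
abbrev pvSt : Type := Int × Int × List Char × PySem.Set (Int × Int)

def pvInvB (n m : Int) (visited : PySem.Set (Int × Int)) : Prop :=
  visited.Nodup ∧
    ∀ p ∈ visited, p = ((0 : Int), (0 : Int)) ∨ (0 ≤ p.1 ∧ p.1 < n ∧ 0 ≤ p.2 ∧ p.2 < m)

def pvNeigB (grid : List (List String)) (n m : Int) (visited : PySem.Set (Int × Int))
    (x y : Int) : List (List Char × Int × Int) :=
  pvDirs.foldl (fun acc d =>
    let nx := x + d.1
    let ny := y + d.2
    if 0 ≤ nx ∧ nx < n ∧ 0 ≤ ny ∧ ny < m ∧ PySem.Set.contains visited (nx, ny) = false then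
      acc ++ [(pvCell grid nx ny, nx, ny)]
    else acc) []

def pvMkSt (pfx : List Char) (visited : PySem.Set (Int × Int))
    (c : List Char × Int × Int) : pvSt :=
  (c.2.1, c.2.2, pfx ++ c.1, PySem.Set.add visited (c.2.1, c.2.2))

def pvWeight (n m : Int) (visited : PySem.Set (Int × Int)) : Nat :=
  5 ^ (n.toNat * m.toNat + 2 - visited.length)

def pvMeasure (n m : Int) (stack : List pvSt) : Nat :=
  (stack.map (fun e => pvWeight n m e.2.2.2)).sum

lemma pvPush_eq {α β : Type} (g : α → β) :
    ∀ (l : List α) (rest : List β),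
      l.foldl (fun st c => g c :: st) rest = l.reverse.map g ++ rest := by
  intro l
  induction l with
  | nil => intro rest; simp
  | cons c t ih => intro rest; simp [List.foldl_cons, ih]

lemma pvNeigB_eq (grid : List (List String)) (n m : Int) (visited : PySem.Set (Int × Int))
    (x y : Int) :
    pvNeigB grid n m visited x y =
      (pvDirs.filter (fun d => decide (0 ≤ x + d.1 ∧ x + d.1 < n ∧ 0 ≤ y + d.2 ∧ y + d.2 < m ∧
          PySem.Set.contains visited (x + d.1, y + d.2) = false))).map
        (fun d => (pvCell grid (x + d.1) (y + d.2), x + d.1, y + d.2)) := by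
  exact PySem.List.foldl_append_ite _ _ _ _

lemma pvNeigB_mem (grid : List (List String)) (n m : Int) (visited : PySem.Set (Int × Int))
    (x y : Int) (c : List Char × Int × Int)
    (hc : c ∈ PySem.List.sorted (pvNeigB grid n m visited x y) pvSortKey) :
    0 ≤ c.2.1 ∧ c.2.1 < n ∧ 0 ≤ c.2.2 ∧ c.2.2 < m ∧ (c.2.1, c.2.2) ∉ visited := by
  rw [PySem.List.mem_sorted, pvNeigB_eq] at hc
  obtain ⟨d, hd, rfl⟩ := List.mem_map.mp hc
  have := List.of_mem_filter hd
  simp only [decide_eq_true_eq] at this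
  refine ⟨this.1, this.2.1, this.2.2.1, this.2.2.2.1, ?_⟩
  intro hmem
  have := this.2.2.2.2
  rw [PySem.Set.contains_eq_listContains] at this
  simp at this
  exact this hmem

lemma pvLenB (n m : Int) (visited : PySem.Set (Int × Int)) (h : pvInvB n m visited) :
    visited.length ≤ n.toNat * m.toNat + 1 := by
  classical
  have hsub : visited.toFinset ⊆ insert ((0:Int),(0:Int)) ((Finset.Ico (0:Int) n) ×ˢ (Finset.Ico (0:Int) m)) := by
    intro p hp
    rcases h.2 p (List.mem_toFinset.mp hp) with h0 | hr
    · simp [h0]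
    · simp [Finset.mem_insert, Finset.mem_product, Finset.mem_Ico]
      right
      exact ⟨⟨hr.1, hr.2.1⟩, hr.2.2.1, hr.2.2.2⟩
  have hcard := Finset.card_le_card hsub
  have h1 : visited.toFinset.card = visited.length := List.toFinset_card_of_nodup h.1
  have h2 : (insert ((0:Int),(0:Int)) ((Finset.Ico (0:Int) n) ×ˢ (Finset.Ico (0:Int) m))).card ≤ n.toNat * m.toNat + 1 := by
    calc _ ≤ ((Finset.Ico (0:Int) n) ×ˢ (Finset.Ico (0:Int) m)).card + 1 := Finset.card_insert_le _ _
    _ = n.toNat * m.toNat + 1 := by simp [Finset.card_product, Int.card_Ico]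
  omega

lemma pvChildren_len (grid : List (List String)) (n m : Int) (visited : PySem.Set (Int × Int))
    (x y : Int) :
    (PySem.List.sorted (pvNeigB grid n m visited x y) pvSortKey).length ≤ 4 := by
  rw [PySem.List.length_sorted, pvNeigB_eq, List.length_map]
  calc (List.filter _ pvDirs).length ≤ pvDirs.length := List.length_filter_le _ _
  _ = 4 := rfl

lemma pvAdd_length (visited : PySem.Set (Int × Int)) (p : Int × Int) (hp : p ∉ visited) :
    (PySem.Set.add visited p).length = visited.length + 1 := by
  rw [PySem.Set.add_of_not_mem hp]
  simp

lemma pvInvB_child (grid : List (List String)) (n m : Int) (visited : PySem.Set (Int × Int))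
    (x y : Int) (hinv : pvInvB n m visited) (c : List Char × Int × Int)
    (hc : c ∈ PySem.List.sorted (pvNeigB grid n m visited x y) pvSortKey) :
    pvInvB n m (PySem.Set.add visited (c.2.1, c.2.2)) := by
  obtain ⟨h1, h2, h3, h4, h5⟩ := pvNeigB_mem grid n m visited x y c hc
  constructor
  · exact PySem.Set.nodup_add _ _ hinv.1
  · intro p hp
    rcases (PySem.Set.mem_add _ _ _).mp hp with h | h
    · exact hinv.2 p h
    · subst h; right; exact ⟨h1, h2, h3, h4⟩

lemma pvMeasure_cons (n m : Int) (e : pvSt) (rest : List pvSt) :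
    pvMeasure n m (e :: rest) = pvWeight n m e.2.2.2 + pvMeasure n m rest := by
  simp [pvMeasure]

lemma pvWeight_pos (n m : Int) (v : PySem.Set (Int × Int)) : 0 < pvWeight n m v :=
  pow_pos (by omega) _

lemma pvMeasure_tail_lt (n m : Int) (e : pvSt) (rest : List pvSt) :
    pvMeasure n m rest < pvMeasure n m (e :: rest) := by
  have := pvWeight_pos n m e.2.2.2
  rw [pvMeasure_cons]; omega

lemma pvMeasure_append (n m : Int) (l rest : List pvSt) :
    pvMeasure n m (l ++ rest) = pvMeasure n m l + pvMeasure n m rest := by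
  simp [pvMeasure]

lemma pvMeasure_push_lt (grid : List (List String)) (n m : Int)
    (visited : PySem.Set (Int × Int)) (x y : Int) (pfx : List Char) (rest : List pvSt)
    (hinv : pvInvB n m visited) :
    pvMeasure n m
        (((PySem.List.sorted (pvNeigB grid n m visited x y) pvSortKey).reverse).foldl
          (fun st c => pvMkSt pfx visited c :: st) rest) <
      pvMeasure n m ((x, y, pfx, visited) :: rest) := by
  rw [pvPush_eq, List.reverse_reverse, pvMeasure_append, pvMeasure_cons]
  set cs := PySem.List.sorted (pvNeigB grid n m visited x y) pvSortKey with hcs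
  have hlen : cs.length ≤ 4 := pvChildren_len grid n m visited x y
  have hvl : visited.length ≤ n.toNat * m.toNat + 1 := pvLenB n m visited hinv
  -- each child's weight
  have hw : ∀ e ∈ cs.map (pvMkSt pfx visited),
      pvWeight n m e.2.2.2 = 5 ^ (n.toNat * m.toNat + 2 - (visited.length + 1)) := by
    intro e he
    obtain ⟨c, hc, rfl⟩ := List.mem_map.mp he
    have hnm := pvNeigB_mem grid n m visited x y c (hcs ▸ hc)
    simp only [pvMkSt, pvWeight]
    rw [pvAdd_length visited _ hnm.2.2.2.2]
  set K := 5 ^ (n.toNat * m.toNat + 2 - (visited.length + 1)) with hK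
  have hsum : pvMeasure n m (cs.map (pvMkSt pfx visited)) = cs.length * K := by
    unfold pvMeasure
    rw [List.sum_eq_card_nsmul _ K (by
      intro v hv
      obtain ⟨e, he, rfl⟩ := List.mem_map.mp hv
      exact hw e he)]
    simp
  have hKpos : 0 < K := pow_pos (by omega) _
  have hpar : pvWeight n m visited = 5 * K := by
    have h1 : n.toNat * m.toNat + 2 - visited.length = (n.toNat * m.toNat + 2 - (visited.length + 1)) + 1 := by omega
    rw [pvWeight, h1, pow_succ]
    ring
  rw [hsum, hpar]
  have : cs.length * K ≤ 4 * K := Nat.mul_le_mul_right K hlen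
  omega

lemma pvHinv_push (grid : List (List String)) (n m : Int)
    (visited : PySem.Set (Int × Int)) (x y : Int) (pfx : List Char) (rest : List pvSt)
    (hhead : pvInvB n m visited) (hrest : ∀ e ∈ rest, pvInvB n m e.2.2.2) :
    ∀ e ∈ ((PySem.List.sorted (pvNeigB grid n m visited x y) pvSortKey).reverse).foldl
        (fun st c => pvMkSt pfx visited c :: st) rest, pvInvB n m e.2.2.2 := by
  rw [pvPush_eq, List.reverse_reverse]
  intro e he
  rcases List.mem_append.mp he with h | h
  · obtain ⟨c, hc, rfl⟩ := List.mem_map.mp h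
    exact pvInvB_child grid n m visited x y hhead c hc
  · exact hrest e h

lemma pvInv0 (n m : Int) : pvInvB n m (PySem.Set.ofList [((0 : Int), (0 : Int))]) :=
  ⟨by decide, by intro p hp; left; simpa [PySem.Set.ofList] using hp⟩

def pvLoopB (grid : List (List String)) (n m : Int) (stack : List pvSt) (best : List Char)
    (hinv : ∀ e ∈ stack, pvInvB n m e.2.2.2) : List Char :=
  match stack, hinv with
  | [], _ => best
  | (x, y, pfx, visited) :: rest, hinv =>
    if best.length ≤ pfx.length ∧ pfx = best.take pfx.length then
      pvLoopB grid n m rest best (fun e he => hinv e (List.mem_cons_of_mem _ he))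
    else if best.take pfx.length < pfx then
      pvLoopB grid n m rest best (fun e he => hinv e (List.mem_cons_of_mem _ he))
    else if x = n - 1 ∧ y = m - 1 then
      pvLoopB grid n m rest (if pfx < best then pfx else best)
        (fun e he => hinv e (List.mem_cons_of_mem _ he))
    else
      pvLoopB grid n m
        (((PySem.List.sorted (pvNeigB grid n m visited x y) pvSortKey).reverse).foldl
          (fun st c => pvMkSt pfx visited c :: st) rest) best
        (pvHinv_push grid n m visited x y pfx rest (hinv _ (List.mem_cons_self))
          (fun e he => hinv e (List.mem_cons_of_mem _ he)))
termination_by pvMeasure n m stack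
decreasing_by
  · exact pvMeasure_tail_lt n m _ rest
  · exact pvMeasure_tail_lt n m _ rest
  · exact pvMeasure_tail_lt n m _ rest
  · exact pvMeasure_push_lt grid n m visited x y pfx rest (hinv _ (List.mem_cons_self))

def smallest_message_alt (grid : List (List String)) : String :=
  let n : Int := grid.length
  let m : Int := (PySem.List.pyGetD grid 0 []).length
  let best0 : List Char := List.replicate (n * m + 1).toNat '{'
  String.ofList (pvLoopB grid n m
    [(0, 0, pvCell grid 0 0, PySem.Set.ofList [((0 : Int), (0 : Int))])] best0
    (by
      intro e he
      simp only [List.mem_singleton] at he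
      subst he
      exact pvInv0 n m))


-- ===== correspondence =====

-- ===== PRECONDITION & SPEC =====
-- Pre_ excludes the inputs on which Python A's indexing can raise IndexError: the empty grid
-- (grid[0]), a first row of length 0 (grid[0][0] / vis[0][0]), and ragged grids with some row
-- shorter than row 0 (grid[nx][ny] during the search); on the few such ragged grids whose short
-- row is never reached because the search is pruned first, A and B both return the sentinel and
-- still agree.
def Pre_smallest_message (grid : List (List String)) : Prop :=
  grid ≠ [] ∧ 0 < (grid.headD []).length ∧ ∀ row ∈ grid, (grid.headD []).length ≤ row.length
instance (grid : List (List String)) : Decidable (Pre_smallest_message grid) := by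
  unfold Pre_smallest_message; infer_instance

def pvWitness_smallest_message : List (List String) := [["a", "b"], ["c", "d"]]

def Spec_smallest_message (grid : List (List String)) (out : String) : Prop :=
  out = smallest_message_alt grid
instance (grid : List (List String)) (out : String) : Decidable (Spec_smallest_message grid out) := by
  unfold Spec_smallest_message; infer_instance

-- ===== CLAIM (what is proved, stated in full; the proofs are below) =====
def Claim_equal_smallest_message : Prop := ∀ (grid : List (List String)), Dom_smallest_message grid → Pre_smallest_message grid → Spec_smallest_message grid (smallest_message grid)

-- ===== LEMMAS AND PROOFS =====
def pvVisOK (n m : Int) (vis : List (List Bool)) : Prop :=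
  vis.length = n.toNat ∧ ∀ row ∈ vis, row.length = m.toNat

def pvR (n m : Int) (vis : List (List Bool)) (visited : PySem.Set (Int × Int)) : Prop :=
  ∀ i j : Int, 0 ≤ i → i < n → 0 ≤ j → j < m → (pvVisGet vis i j = true ↔ (i, j) ∈ visited)

lemma pvNeigA_eq (grid : List (List String)) (n m : Int) (vis : List (List Bool)) (x y : Int) :
    pvNeigA grid n m vis x y =
      (pvDirs.filter (fun d => decide (0 ≤ x + d.1 ∧ x + d.1 < n ∧ 0 ≤ y + d.2 ∧ y + d.2 < m ∧
          pvVisGet vis (x + d.1) (y + d.2) = false))).map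
        (fun d => (pvCell grid (x + d.1) (y + d.2), x + d.1, y + d.2)) := by
  exact PySem.List.foldl_append_ite _ _ _ _

lemma pvNeigA_mem (grid : List (List String)) (n m : Int) (vis : List (List Bool))
    (x y : Int) (c : List Char × Int × Int)
    (hc : c ∈ PySem.List.sorted (pvNeigA grid n m vis x y) pvSortKey) :
    0 ≤ c.2.1 ∧ c.2.1 < n ∧ 0 ≤ c.2.2 ∧ c.2.2 < m ∧ pvVisGet vis c.2.1 c.2.2 = false := by
  rw [PySem.List.mem_sorted, pvNeigA_eq] at hc
  obtain ⟨d, hd, rfl⟩ := List.mem_map.mp hc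
  have := List.of_mem_filter hd
  simp only [decide_eq_true_eq] at this
  exact this

lemma pvNeig_eq (grid : List (List String)) (n m : Int) (vis : List (List Bool))
    (visited : PySem.Set (Int × Int)) (x y : Int) (hR : pvR n m vis visited) :
    pvNeigA grid n m vis x y = pvNeigB grid n m visited x y := by
  rw [pvNeigA_eq, pvNeigB_eq]
  congr 1
  apply List.filter_congr
  intro d _
  simp only [decide_eq_decide]
  constructor
  · rintro ⟨h1, h2, h3, h4, h5⟩
    refine ⟨h1, h2, h3, h4, ?_⟩
    rw [← Bool.not_eq_true, PySem.Set.contains_iff]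
    intro hmem
    have := (hR _ _ h1 h2 h3 h4).mpr hmem
    rw [h5] at this
    simp at this
  · rintro ⟨h1, h2, h3, h4, h5⟩
    refine ⟨h1, h2, h3, h4, ?_⟩
    rw [← Bool.not_eq_true, hR _ _ h1 h2 h3 h4]
    rw [← Bool.not_eq_true, PySem.Set.contains_iff] at h5
    exact h5

lemma pvVisOK_set (n m : Int) (vis : List (List Bool)) (nx ny : Int)
    (hOK : pvVisOK n m vis) : pvVisOK n m (pvVisSet vis nx ny) := by
  constructor
  · simp [pvVisSet, hOK.1]
  · intro row hrow
    by_cases hlt : nx.toNat < vis.length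
    · rcases List.mem_or_eq_of_mem_set hrow with h | h
      · exact hOK.2 row h
      · subst h
        rw [List.length_set]
        exact hOK.2 _ (by rw [List.getD_eq_getElem _ _ hlt]; exact List.getElem_mem _)
    · rw [pvVisSet, List.set_eq_of_length_le (by omega)] at hrow
      exact hOK.2 row hrow

lemma pvGetD_set_self {α : Type} (l : List α) (i : Nat) (a d : α) (h : i < l.length) :
    (l.set i a).getD i d = a := by
  rw [List.getD_eq_getElem _ _ (by simpa using h)]
  simp [List.getElem_set_self]

lemma pvGetD_set_ne {α : Type} (l : List α) (i k : Nat) (a d : α) (hne : k ≠ i) :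
    (l.set i a).getD k d = l.getD k d := by
  by_cases hk : k < l.length
  · rw [List.getD_eq_getElem _ _ (by simpa using hk), List.getD_eq_getElem _ _ hk]
    rw [List.getElem_set_ne (by omega)]
  · rw [List.getD_eq_default _ _ (by simpa using hk), List.getD_eq_default _ _ (by omega)]

lemma pvRowLen (n m : Int) (vis : List (List Bool)) (hOK : pvVisOK n m vis) (i : Nat)
    (hi : i < vis.length) : (vis.getD i []).length = m.toNat :=
  hOK.2 _ (by rw [List.getD_eq_getElem _ _ hi]; exact List.getElem_mem _)

lemma pvGuard (n m nx ny : Int) (vis : List (List Bool)) (hOK : pvVisOK n m vis)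
    (hb : 0 ≤ nx ∧ nx < n ∧ 0 ≤ ny ∧ ny < m) (hf : pvVisGet vis nx ny = false) :
    nx.toNat < vis.length ∧ ny.toNat < (vis.getD nx.toNat []).length ∧
      (vis.getD nx.toNat []).getD ny.toNat false = false := by
  have h1 : nx.toNat < vis.length := by rw [hOK.1]; omega
  refine ⟨h1, ?_, hf⟩
  rw [pvRowLen n m vis hOK _ h1]
  omega

lemma pvR_step (n m : Int) (vis : List (List Bool)) (visited : PySem.Set (Int × Int))
    (nx ny : Int) (hOK : pvVisOK n m vis) (hR : pvR n m vis visited)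
    (hb : 0 ≤ nx ∧ nx < n ∧ 0 ≤ ny ∧ ny < m) :
    pvR n m (pvVisSet vis nx ny) (PySem.Set.add visited (nx, ny)) := by
  intro i j hi1 hi2 hj1 hj2
  have hnxl : nx.toNat < vis.length := by rw [hOK.1]; omega
  rw [PySem.Set.mem_add]
  unfold pvVisGet pvVisSet
  by_cases hix : i = nx
  · subst hix
    rw [pvGetD_set_self _ _ _ _ hnxl]
    by_cases hjy : j = ny
    · subst hjy
      rw [pvGetD_set_self _ _ _ _ (by rw [pvRowLen n m vis hOK _ hnxl]; omega)]
      simp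
    · rw [pvGetD_set_ne _ _ _ _ _ (by omega)]
      have := hR i j hi1 hi2 hj1 hj2
      unfold pvVisGet at this
      rw [this]
      constructor
      · exact Or.inl
      · rintro (h | h)
        · exact h
        · exfalso; apply hjy; exact congrArg Prod.snd h
  · rw [pvGetD_set_ne _ _ _ _ _ (by omega)]
    have := hR i j hi1 hi2 hj1 hj2
    unfold pvVisGet at this
    rw [this]
    constructor
    · exact Or.inl
    · rintro (h | h)
      · exact h
      · exfalso; apply hix; exact congrArg Prod.fst h

lemma pvLoopB_stack_congr (grid : List (List String)) (n m : Int) {s s' : List pvSt}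
    (best : List Char) (hss : s = s') (h : ∀ e ∈ s, pvInvB n m e.2.2.2)
    (h' : ∀ e ∈ s', pvInvB n m e.2.2.2) :
    pvLoopB grid n m s best h = pvLoopB grid n m s' best h' := by
  cases hss; rfl

lemma pvSimGo (grid : List (List String)) (n m : Int) (vis : List (List Bool))
    (visited : PySem.Set (Int × Int)) (pfx : List Char)
    (hOK : pvVisOK n m vis) (hR : pvR n m vis visited)
    (IH : ∀ (vis' : List (List Bool)) (visited' : PySem.Set (Int × Int)) (x' y' : Int)
        (pfx' best' : List Char) (rest' : List pvSt)
        (hinv' : ∀ e ∈ (x', y', pfx', visited') :: rest', pvInvB n m e.2.2.2),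
        pvCountFalse vis' < pvCountFalse vis → pvVisOK n m vis' → pvR n m vis' visited' →
        pvLoopB grid n m ((x', y', pfx', visited') :: rest') best' hinv' =
          pvLoopB grid n m rest' (pvDfsA grid n m vis' x' y' pfx' best')
            (fun e he => hinv' e (List.mem_cons_of_mem _ he))) :
    ∀ (cs : List (List Char × Int × Int)) (best : List Char) (rest : List pvSt)
      (hcs : ∀ c ∈ cs, 0 ≤ c.2.1 ∧ c.2.1 < n ∧ 0 ≤ c.2.2 ∧ c.2.2 < m ∧
        pvVisGet vis c.2.1 c.2.2 = false ∧ (c.2.1, c.2.2) ∉ visited)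
      (hstk : ∀ e ∈ cs.map (pvMkSt pfx visited) ++ rest, pvInvB n m e.2.2.2)
      (hrest : ∀ e ∈ rest, pvInvB n m e.2.2.2),
      pvLoopB grid n m (cs.map (pvMkSt pfx visited) ++ rest) best hstk =
        pvLoopB grid n m rest (pvGoA grid n m vis cs pfx best) hrest := by
  intro cs
  induction cs with
  | nil =>
    intro best rest hcs hstk hrest
    rw [pvGoA]
    exact pvLoopB_stack_congr grid n m best (by simp) hstk hrest
  | cons c t ih =>
    intro best rest hcs hstk hrest
    obtain ⟨ch, nx, ny⟩ := c
    have hc := hcs _ (List.mem_cons_self)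
    simp only at hc
    have hguard := pvGuard n m nx ny vis hOK ⟨hc.1, hc.2.1, hc.2.2.1, hc.2.2.2.1⟩ hc.2.2.2.2.1
    have hdecr := pvVisSet_decr vis nx ny hguard
    have hOK' := pvVisOK_set n m vis nx ny hOK
    have hR' := pvR_step n m vis visited nx ny hOK hR ⟨hc.1, hc.2.1, hc.2.2.1, hc.2.2.2.1⟩
    -- LHS: head is pvMkSt pfx visited (ch, nx, ny)
    have step := IH (pvVisSet vis nx ny) (PySem.Set.add visited (nx, ny)) nx ny (pfx ++ ch) best
      (t.map (pvMkSt pfx visited) ++ rest)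
      (by
        intro e he
        exact hstk e (by simpa using (by simpa using he)))
      hdecr hOK' hR'
    calc pvLoopB grid n m ((pvMkSt pfx visited (ch, nx, ny) :: t.map (pvMkSt pfx visited)) ++ rest) best hstk
        = pvLoopB grid n m ((nx, ny, pfx ++ ch, PySem.Set.add visited (nx, ny)) :: (t.map (pvMkSt pfx visited) ++ rest)) best
            (by intro e he; exact hstk e (by simpa using he)) := by
          apply pvLoopB_stack_congr
          simp [pvMkSt]
      _ = pvLoopB grid n m (t.map (pvMkSt pfx visited) ++ rest)
            (pvDfsA grid n m (pvVisSet vis nx ny) nx ny (pfx ++ ch) best) _ := step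
      _ = pvLoopB grid n m rest (pvGoA grid n m vis ((ch, nx, ny) :: t) pfx best) hrest := by
          rw [pvGoA]
          simp only [dif_pos hguard]
          exact ih _ rest (fun c hct => hcs c (List.mem_cons_of_mem _ hct)) _ hrest

lemma pvSim (grid : List (List String)) (n m : Int) :
    ∀ (N : Nat) (vis : List (List Bool)) (visited : PySem.Set (Int × Int)) (x y : Int)
      (pfx best : List Char) (rest : List pvSt)
      (hinv : ∀ e ∈ (x, y, pfx, visited) :: rest, pvInvB n m e.2.2.2),
      pvCountFalse vis ≤ N → pvVisOK n m vis → pvR n m vis visited →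
      pvLoopB grid n m ((x, y, pfx, visited) :: rest) best hinv =
        pvLoopB grid n m rest (pvDfsA grid n m vis x y pfx best)
          (fun e he => hinv e (List.mem_cons_of_mem _ he)) := by
  intro N
  induction N using Nat.strong_induction_on with
  | _ N IHN =>
  intro vis visited x y pfx best rest hinv hle hOK hR
  rw [pvLoopB, pvDfsA]
  split_ifs with hc1 hc2 hc3 hc4
  · rfl
  · rfl
  · rfl
  · rfl
  · have hAB := pvNeig_eq grid n m vis visited x y hR
    have hstack :
        ((PySem.List.sorted (pvNeigB grid n m visited x y) pvSortKey).reverse).foldl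
            (fun st c => pvMkSt pfx visited c :: st) rest =
          (PySem.List.sorted (pvNeigA grid n m vis x y) pvSortKey).map (pvMkSt pfx visited)
            ++ rest := by
      rw [pvPush_eq, List.reverse_reverse, hAB]
    have hcs : ∀ c ∈ PySem.List.sorted (pvNeigA grid n m vis x y) pvSortKey,
        0 ≤ c.2.1 ∧ c.2.1 < n ∧ 0 ≤ c.2.2 ∧ c.2.2 < m ∧
          pvVisGet vis c.2.1 c.2.2 = false ∧ (c.2.1, c.2.2) ∉ visited := by
      intro c hc
      have h := pvNeigA_mem grid n m vis x y c hc
      refine ⟨h.1, h.2.1, h.2.2.1, h.2.2.2.1, h.2.2.2.2, ?_⟩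
      intro hmem
      have := (hR _ _ h.1 h.2.1 h.2.2.1 h.2.2.2.1).mpr hmem
      rw [h.2.2.2.2] at this
      simp at this
    have hstk' : ∀ e ∈ (PySem.List.sorted (pvNeigA grid n m vis x y) pvSortKey).map
        (pvMkSt pfx visited) ++ rest, pvInvB n m e.2.2.2 := by
      rw [← hstack]
      exact pvHinv_push grid n m visited x y pfx rest (hinv _ List.mem_cons_self)
        (fun e he => hinv e (List.mem_cons_of_mem _ he))
    refine (pvLoopB_stack_congr grid n m best hstack _ hstk').trans ?_
    exact pvSimGo grid n m vis visited pfx hOK hR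
      (fun vis' visited' x' y' pfx' best' rest' hinv' hlt hOK' hR' =>
        IHN (pvCountFalse vis') (lt_of_lt_of_le hlt hle) vis' visited' x' y' pfx' best' rest'
          hinv' (le_refl _) hOK' hR')
      _ best rest hcs hstk' (fun e he => hinv e (List.mem_cons_of_mem _ he))

lemma pvVisOK_init (n m : Int) :
    pvVisOK n m (pvVisSet (List.replicate n.toNat (List.replicate m.toNat false)) 0 0) := by
  apply pvVisOK_set
  constructor
  · simp
  · intro row hrow
    rw [List.eq_of_mem_replicate hrow]
    simp

lemma pvR_init (n m : Int) :
    pvR n m (pvVisSet (List.replicate n.toNat (List.replicate m.toNat false)) 0 0)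
      (PySem.Set.ofList [((0 : Int), (0 : Int))]) := by
  intro i j hi1 hi2 hj1 hj2
  have hn : 0 < n.toNat := by omega
  have hm : 0 < m.toNat := by omega
  have hmem : ((i, j) ∈ PySem.Set.ofList [((0 : Int), (0 : Int))]) ↔ (i = 0 ∧ j = 0) := by
    rw [PySem.Set.mem_ofList]
    simp [Prod.ext_iff]
  rw [hmem]
  unfold pvVisGet pvVisSet
  simp only [Int.toNat_zero]
  by_cases hi0 : i.toNat = 0
  · rw [hi0, pvGetD_set_self _ _ _ _ (by simp [hn]),
      List.getD_replicate (List.replicate m.toNat false) (by omega)]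
    by_cases hj0 : j.toNat = 0
    · rw [hj0, pvGetD_set_self _ _ _ _ (by simp [hm])]
      simp
      omega
    · rw [pvGetD_set_ne _ _ _ _ _ hj0, List.getD_replicate false (by omega)]
      simp
      omega
  · rw [pvGetD_set_ne _ _ _ _ _ hi0, List.getD_replicate (List.replicate m.toNat false) (by omega),
      List.getD_replicate false (by omega)]
    simp
    omega

lemma pv_equal (grid : List (List String)) :
    smallest_message grid = smallest_message_alt grid := by
  unfold smallest_message smallest_message_alt
  simp only []
  congr 1
  symm
  refine Eq.trans
    (pvSim (grid := grid) (n := (grid.length : Int)) (m := ((PySem.List.pyGetD grid 0 []).length : Int))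
      (pvCountFalse (pvVisSet (List.replicate (grid.length : Int).toNat
        (List.replicate ((PySem.List.pyGetD grid 0 []).length : Int).toNat false)) 0 0))
      (pvVisSet (List.replicate (grid.length : Int).toNat
        (List.replicate ((PySem.List.pyGetD grid 0 []).length : Int).toNat false)) 0 0)
      (PySem.Set.ofList [((0 : Int), (0 : Int))]) 0 0 (pvCell grid 0 0) _ [] _ le_rfl
      (pvVisOK_init _ _) (pvR_init _ _)) ?_
  rw [pvLoopB]
-- ===== VERDICT (by name: the statement is the Claim_ definition above) =====
theorem smallest_message_spec : Claim_equal_smallest_message := by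
  intro grid _ _
  unfold Spec_smallest_message
  exact pv_equal grid
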